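-- pv_equiv track=rewrite | github.com/xXLauch96Xxataolde/eprAufgabe6 | scr/inoutcsv/analyzer.py | stroke_count
-- ===== SOURCE A (Python) =====
-- def stroke_count(file_data):
--     """function, which counts the key strokes of a given string"""
--     stroke_count_n = 0
--     for c in file_data:
--         if c.islower() or c == '.' or c == ',' or c == ' ':
--             stroke_count_n += 1
--         else:
--                 stroke_count_n += 2
--     return stroke_count_n
-- ===== SOURCE B (Python) =====
-- def stroke_count(file_data):
--     """Counts keystrokes via a frequency table: tally each distinct character
--     once, then sum count * weight over the distinct characters."""
--     freq = {}
--     for c in file_data: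
--         freq[c] = freq.get(c, 0) + 1
--     total = 0
--     for c, n in freq.items():
--         total += n * (1 if c.islower() or c == '.' or c == ',' or c == ' ' else 2)
--     return total
-- ===== Notes on version B (the rewrite author's own statement) =====
-- stated objective: alternative
-- what changed: Replaces A's per-character 1-or-2 branch accumulator with a two-phase frequency-table algorithm: build a dict counting occurrences of each distinct character, then sum count*weight over the dict's items.
import Mathlib
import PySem

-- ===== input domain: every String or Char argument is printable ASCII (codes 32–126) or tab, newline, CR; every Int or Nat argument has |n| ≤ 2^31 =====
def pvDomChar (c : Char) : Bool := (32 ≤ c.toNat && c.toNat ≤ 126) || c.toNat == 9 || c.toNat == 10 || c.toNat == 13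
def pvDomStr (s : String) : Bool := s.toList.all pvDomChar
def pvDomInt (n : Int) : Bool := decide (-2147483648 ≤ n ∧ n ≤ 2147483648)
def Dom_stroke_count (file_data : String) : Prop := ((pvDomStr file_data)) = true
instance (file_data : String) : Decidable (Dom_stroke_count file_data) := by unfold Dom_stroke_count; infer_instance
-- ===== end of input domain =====

-- B replaces A's per-char 1-or-2 accumulator with a two-phase frequency-table algorithm
-- (count each distinct char, then sum count*weight over the table) — objective: alternative.

-- ===== PORT A =====
-- literal port of A: a running counter, +1 for lowercase/'.'/','/' ', else +2
def stroke_count (file_data : String) : Int :=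
  file_data.toList.foldl
    (fun acc c =>
      if PySem.Chars.islower c || c == '.' || c == ',' || c == ' ' then acc + 1 else acc + 2)
    0

-- ===== PORT B =====
-- literal port of B: build freq dict (freq[c] = freq.get(c,0)+1), then sum n * (1 or 2) over items
def stroke_count_alt (file_data : String) : Int :=
  (file_data.toList.foldl (fun d c => d.modify c 0 (· + 1)) PySem.Dict.empty).items.foldl
    (fun total p =>
      total + p.2 * (if PySem.Chars.islower p.1 || p.1 == '.' || p.1 == ',' || p.1 == ' '
                     then 1 else 2))
    0

-- ===== PRECONDITION & SPEC =====
def Spec_stroke_count (file_data : String) (out : Int) : Prop := out = stroke_count_alt file_data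
instance (file_data : String) (out : Int) : Decidable (Spec_stroke_count file_data out) := by unfold Spec_stroke_count; infer_instance

-- ===== CLAIM =====
def Claim_equal_stroke_count : Prop := ∀ (file_data : String), Dom_stroke_count file_data → Spec_stroke_count file_data (stroke_count file_data)

-- ===== LEMMAS AND PROOFS =====
-- per-character weight (proof-only helper)
def pvWgt (c : Char) : Int :=
  if PySem.Chars.islower c || c == '.' || c == ',' || c == ' ' then 1 else 2

-- weighted sum of a dict's items (proof-only helper)
def pvW (l : List (Char × Int)) : Int := (l.map (fun p => p.2 * pvWgt p.1)).sum

theorem pvA_fold_eq (l : List Char) (n : Int) :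
    l.foldl
      (fun acc c =>
        if PySem.Chars.islower c || c == '.' || c == ',' || c == ' ' then acc + 1 else acc + 2)
      n = n + (l.map pvWgt).sum := by
  induction l generalizing n with
  | nil => simp
  | cons c t ih =>
    simp only [List.foldl_cons, List.map_cons, List.sum_cons, ih, pvWgt]
    split_ifs <;> ring

-- replacing the unique matching entry's value v by v + 1 adds pvWgt c to the weighted sum
theorem pvW_replace (l : List (Char × Int)) (c : Char) (pv : Char × Int)
    (hnd : (l.map Prod.fst).Nodup)
    (hf : l.find? (fun p => p.1 == c) = some pv) :
    pvW (l.map (fun p => if p.1 == c then (c, pv.2 + 1) else p)) = pvW l + pvWgt c := by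
  induction l with
  | nil => simp at hf
  | cons p t ih =>
    by_cases hb : (p.1 == c) = true
    · have hpc : p.1 = c := by simpa using hb
      have hpv : pv = p := by
        simp only [List.find?_cons, hb] at hf
        exact (Option.some_inj.mp hf).symm
      have hnotin : ∀ q ∈ t, (fun p => if p.1 == c then (c, pv.2 + 1) else p) q = q := by
        intro q hq
        have hni : p.1 ∉ t.map Prod.fst := (List.nodup_cons.mp hnd).1
        have : (q.1 == c) = false := by
          simp only [beq_eq_false_iff_ne, ne_eq]
          intro hqc
          exact hni (by rw [hpc, ← hqc]; exact List.mem_map_of_mem hq)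
        simp [this]
      have hmapid : t.map (fun p => if p.1 == c then (c, pv.2 + 1) else p) = t := by
        rw [List.map_congr_left hnotin]; simp
      subst hpv
      simp only [List.map_cons, hb, if_pos, hmapid, pvW, List.map_cons, List.sum_cons]
      rw [hpc]
      ring
    · have hb' : (p.1 == c) = false := by simpa using hb
      have hf' : t.find? (fun p => p.1 == c) = some pv := by
        simpa only [List.find?_cons, hb', cond_false] using hf
      have ih' := ih (List.nodup_cons.mp hnd).2 hf'
      have hne : p.1 ≠ c := by simpa using hb
      simp [pvW, hne] at ih' ⊢
      omega

-- one counter bump adds pvWgt c to the weighted items sum (keys unique)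
theorem pvW_modify (d : PySem.Dict Char Int) (c : Char) (h : d.keys.Nodup) :
    pvW (d.modify c 0 (· + 1)).items = pvW d.items + pvWgt c := by
  by_cases hc : d.contains c = true
  · obtain ⟨pv, hpv⟩ : ∃ pv, d.items.find? (fun p => p.1 == c) = some pv := by
      apply Option.isSome_iff_exists.mp
      rw [List.find?_isSome]
      simpa [PySem.Dict.contains, List.any_eq_true] using hc
    have hget : d.getD c 0 = pv.2 := by
      simp [PySem.Dict.getD, PySem.Dict.get?, hpv]
    simp only [PySem.Dict.modify, PySem.Dict.insert, hc, if_pos, hget]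
    exact pvW_replace d.items c pv (by simpa [PySem.Dict.keys] using h) hpv
  · have hfn : d.items.find? (fun p => p.1 == c) = none := by
      rw [List.find?_eq_none]
      intro p hp hb
      exact hc (by simp only [PySem.Dict.contains, List.any_eq_true]; exact ⟨p, hp, hb⟩)
    have hget : d.getD c 0 = 0 := by
      simp [PySem.Dict.getD, PySem.Dict.get?, hfn]
    simp only [PySem.Dict.modify, PySem.Dict.insert, hc, hget]
    simp [pvW]

-- nodup keys preserved by one bump (via the library fold lemma at l = [c])
theorem pvNodup_modify (d : PySem.Dict Char Int) (c : Char) (h : d.keys.Nodup) :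
    (d.modify c 0 (· + 1)).keys.Nodup := by
  have := PySem.Dict.nodup_keys_foldl_modify_key [c] (fun x => x) 0
    (fun _ _ v => v + 1) d h
  simpa using this

-- the counter loop adds the weighted sum of the scanned characters
theorem pvW_counter_loop (l : List Char) (d : PySem.Dict Char Int) (h : d.keys.Nodup) :
    pvW ((l.foldl (fun d c => d.modify c 0 (· + 1)) d).items)
      = pvW d.items + (l.map pvWgt).sum := by
  induction l generalizing d with
  | nil => simp
  | cons c t ih =>
    simp only [List.foldl_cons, List.map_cons, List.sum_cons]
    rw [ih _ (pvNodup_modify d c h), pvW_modify d c h]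
    ring

-- ===== VERDICT =====
theorem stroke_count_spec : Claim_equal_stroke_count := by
  intro s _
  unfold Spec_stroke_count stroke_count stroke_count_alt
  rw [pvA_fold_eq,
    PySem.List.foldl_add _
      (fun p : Char × Int =>
        p.2 * (if PySem.Chars.islower p.1 || p.1 == '.' || p.1 == ',' || p.1 == ' '
               then 1 else 2)) 0]
  have h := pvW_counter_loop s.toList PySem.Dict.empty
    (by simp [PySem.Dict.keys, PySem.Dict.empty])
  simp only [pvW, pvWgt,
    show (PySem.Dict.empty : PySem.Dict Char Int).items = [] from rfl,
    List.map_nil, List.sum_nil, zero_add] at h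
  rw [← h]
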